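-- pv_equiv track=rewrite | github.com/molomol0/Gomoku | minmax.py | is_critical_move
-- ===== SOURCE A (Python) =====
-- def check_line_fast(board, row, col, dx, dy, size, target_count=5):
--     """Ultra-fast line checking with early termination"""
--     if board[row][col] == 0:
--         return 0
--
--     player = board[row][col]
--     count = 1
--
--     # Positive direction - unrolled for speed
--     r, c = row + dx, col + dy
--     if 0 <= r < size and 0 <= c < size and board[r][c] == player:
--         count += 1
--         r, c = r + dx, c + dy
--         if 0 <= r < size and 0 <= c < size and board[r][c] == player:
--             count += 1
--             r, c = r + dx, c + dy
--             if 0 <= r < size and 0 <= c < size and board[r][c] == player: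
--                 count += 1
--                 r, c = r + dx, c + dy
--                 if 0 <= r < size and 0 <= c < size and board[r][c] == player:
--                     count += 1
--                     # Continue if we need more than 5
--                     while count < target_count and 0 <= r + dx < size and 0 <= c + dy < size and board[r + dx][c + dy] == player:
--                         count += 1
--                         r, c = r + dx, c + dy
--
--     # Negative direction - unrolled for speed
--     r, c = row - dx, col - dy
--     if 0 <= r < size and 0 <= c < size and board[r][c] == player:
--         count += 1
--         r, c = r - dx, c - dy
--         if 0 <= r < size and 0 <= c < size and board[r][c] == player:
--             count += 1
--             r, c = r - dx, c - dy
--             if 0 <= r < size and 0 <= c < size and board[r][c] == player: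
--                 count += 1
--                 r, c = r - dx, c - dy
--                 if 0 <= r < size and 0 <= c < size and board[r][c] == player:
--                     count += 1
--                     # Continue if we need more than 5
--                     while count < target_count and 0 <= r - dx < size and 0 <= c - dy < size and board[r - dx][c - dy] == player:
--                         count += 1
--                         r, c = r - dx, c - dy
--
--     return count
--
-- def check_five_in_row_from_position(board, row, col, size):
--     """Optimized 5-in-a-row check with early termination"""
--     if board[row][col] == 0:
--         return False
--
--     # Check each direction - return immediately on finding 5
--     directions = [(0, 1), (1, 0), (1, 1), (-1, 1)]
--     for dx, dy in directions:
--         if check_line_fast(board, row, col, dx, dy, size, 5) >= 5: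
--             return True
--
--     return False
--
-- def is_critical_move(board, row, col, player, size):
--     """Check if move is critical (wins or blocks win) - optimized"""
--     # Temporarily place stone
--     board[row][col] = player
--
--     # Check for immediate win
--     if check_five_in_row_from_position(board, row, col, size):
--         board[row][col] = 0
--         return 3  # Immediate win
--
--     # Check for 4-in-a-row threat
--     threat_level = 0
--     directions = [(0, 1), (1, 0), (1, 1), (-1, 1)]
--     for dx, dy in directions:
--         count = check_line_fast(board, row, col, dx, dy, size, 4)
--         if count >= 4:
--             threat_level = 2  # Creates threat
--             break
--         elif count == 3:
--             threat_level = max(threat_level, 1)  # Good move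
--
--     board[row][col] = 0
--     return threat_level
-- ===== SOURCE B (Python) =====
-- def _cell_at(board, size, r, c):
--     """Cell value inside the size x size window, None outside it."""
--     if 0 <= r < size and 0 <= c < size:
--         return board[r][c]
--     return None
--
--
-- def _prefix_run(cells, player):
--     """Number of leading cells equal to player."""
--     n = 0
--     for v in cells:
--         if v != player:
--             break
--         n += 1
--     return n
--
--
-- def is_critical_move(board, row, col, player, size):
--     """Rate a move: 3 = wins, 2 = four-line threat, 1 = makes a three, 0 = neither.
--
--     Like the original, temporarily places the stone and then resets the cell to 0.
--     """
--     board[row][col] = player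
--     best = 0
--     if player != 0:  # placing an empty value never creates a line
--         for dx, dy in ((0, 1), (1, 0), (1, 1), (-1, 1)):
--             fwd = [_cell_at(board, size, row + k * dx, col + k * dy) for k in range(1, 5)]
--             bwd = [_cell_at(board, size, row - k * dx, col - k * dy) for k in range(1, 5)]
--             run = 1 + _prefix_run(fwd, player) + _prefix_run(bwd, player)
--             if run >= 5:
--                 best = 3
--                 break
--             if run >= 4:
--                 best = 2
--             elif run == 3 and best < 1:
--                 best = 1
--     board[row][col] = 0
--     return best
-- ===== Notes on version B (the rewrite author's own statement) =====
-- stated objective: simpler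
-- what changed: A's unrolled four-deep if-chains with target-capped while loops and its two separate passes (win check, then threat scan) are replaced by building the four-cell window on each side of the move per axis and classifying the prefix-run length in a single loop; both mutate the board identically (place stone, reset cell to 0).
-- outside the precondition, e.g. on is_critical_move([[1, 0], [0, 0]], 0, 0, 2, 5): A returns 0, B raises IndexError
import Mathlib
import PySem

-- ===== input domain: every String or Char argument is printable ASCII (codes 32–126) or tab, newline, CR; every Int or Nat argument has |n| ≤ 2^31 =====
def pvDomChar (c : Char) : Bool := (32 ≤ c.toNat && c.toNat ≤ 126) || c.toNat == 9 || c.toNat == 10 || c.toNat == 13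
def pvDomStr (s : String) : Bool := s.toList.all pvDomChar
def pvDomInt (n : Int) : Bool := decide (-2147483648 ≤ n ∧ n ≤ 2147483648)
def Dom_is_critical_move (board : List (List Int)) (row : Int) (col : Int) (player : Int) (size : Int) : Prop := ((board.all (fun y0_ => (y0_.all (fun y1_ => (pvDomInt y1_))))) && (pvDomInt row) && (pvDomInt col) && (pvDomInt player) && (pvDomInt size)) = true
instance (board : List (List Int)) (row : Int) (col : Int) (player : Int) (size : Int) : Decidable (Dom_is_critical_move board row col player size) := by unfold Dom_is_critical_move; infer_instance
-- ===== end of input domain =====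

-- B replaces A's unrolled four-deep if-chains plus target-capped while loops and its two
-- separate scan phases (win check, then threat scan) by building the four-cell window on
-- each side of the move per axis and classifying the prefix-run length in a single loop;
-- equivalence is about RETURN values (both Pythons mutate `board` identically: the cell is
-- set to player, then reset to 0).

-- board[r][c] for indices the guards have already confined to 0 ≤ · < size (default never
-- read under Pre_); both ports read the placed board through it.
def pvCell (b : List (List Int)) (r c : Int) : Int :=
  PySem.List.pyGetD (PySem.List.pyGetD b r ([] : List Int)) c 0

-- the board after `board[row][col] = player`
def pvPlace (board : List (List Int)) (row col player : Int) : List (List Int) :=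
  PySem.List.pySetD board row
    (PySem.List.pySetD (PySem.List.pyGetD board row ([] : List Int)) col player)

-- ===== PORT A =====
-- termination measure for the ports' while loops (cited by name in decreasing_by)
theorem pvFuelDec {count target : Int} (h : count < target) :
    (target - (count + 1)).toNat < (target - count).toNat := by omega

def aWhilePos (b : List (List Int)) (size player dx dy target : Int) (count r c : Int) : Int :=
  if _h : count < target ∧ 0 ≤ r + dx ∧ r + dx < size ∧ 0 ≤ c + dy ∧ c + dy < size ∧
      pvCell b (r + dx) (c + dy) = player then
    aWhilePos b size player dx dy target (count + 1) (r + dx) (c + dy)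
  else count
termination_by (target - count).toNat
decreasing_by exact pvFuelDec _h.1

def aWhileNeg (b : List (List Int)) (size player dx dy target : Int) (count r c : Int) : Int :=
  if _h : count < target ∧ 0 ≤ r - dx ∧ r - dx < size ∧ 0 ≤ c - dy ∧ c - dy < size ∧
      pvCell b (r - dx) (c - dy) = player then
    aWhileNeg b size player dx dy target (count + 1) (r - dx) (c - dy)
  else count
termination_by (target - count).toNat
decreasing_by exact pvFuelDec _h.1

def aPosBlock (b : List (List Int)) (size player dx dy target row col : Int) : Int :=
  if 0 ≤ row + dx ∧ row + dx < size ∧ 0 ≤ col + dy ∧ col + dy < size ∧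
      pvCell b (row + dx) (col + dy) = player then
    if 0 ≤ row + dx + dx ∧ row + dx + dx < size ∧ 0 ≤ col + dy + dy ∧ col + dy + dy < size ∧
        pvCell b (row + dx + dx) (col + dy + dy) = player then
      if 0 ≤ row + dx + dx + dx ∧ row + dx + dx + dx < size ∧ 0 ≤ col + dy + dy + dy ∧
          col + dy + dy + dy < size ∧ pvCell b (row + dx + dx + dx) (col + dy + dy + dy) = player then
        if 0 ≤ row + dx + dx + dx + dx ∧ row + dx + dx + dx + dx < size ∧
            0 ≤ col + dy + dy + dy + dy ∧ col + dy + dy + dy + dy < size ∧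
            pvCell b (row + dx + dx + dx + dx) (col + dy + dy + dy + dy) = player then
          aWhilePos b size player dx dy target 5 (row + dx + dx + dx + dx) (col + dy + dy + dy + dy)
        else 4
      else 3
    else 2
  else 1

def aNegBlock (b : List (List Int)) (size player dx dy target count row col : Int) : Int :=
  if 0 ≤ row - dx ∧ row - dx < size ∧ 0 ≤ col - dy ∧ col - dy < size ∧
      pvCell b (row - dx) (col - dy) = player then
    if 0 ≤ row - dx - dx ∧ row - dx - dx < size ∧ 0 ≤ col - dy - dy ∧ col - dy - dy < size ∧
        pvCell b (row - dx - dx) (col - dy - dy) = player then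
      if 0 ≤ row - dx - dx - dx ∧ row - dx - dx - dx < size ∧ 0 ≤ col - dy - dy - dy ∧
          col - dy - dy - dy < size ∧ pvCell b (row - dx - dx - dx) (col - dy - dy - dy) = player then
        if 0 ≤ row - dx - dx - dx - dx ∧ row - dx - dx - dx - dx < size ∧
            0 ≤ col - dy - dy - dy - dy ∧ col - dy - dy - dy - dy < size ∧
            pvCell b (row - dx - dx - dx - dx) (col - dy - dy - dy - dy) = player then
          aWhileNeg b size player dx dy target (count + 4) (row - dx - dx - dx - dx) (col - dy - dy - dy - dy)
        else count + 3
      else count + 2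
    else count + 1
  else count

def check_line_fast (b : List (List Int)) (row col dx dy size target : Int) : Int :=
  if pvCell b row col = 0 then 0
  else
    aNegBlock b size (pvCell b row col) dx dy target
      (aPosBlock b size (pvCell b row col) dx dy target row col) row col

def aDirs : List (Int × Int) := [(0, 1), (1, 0), (1, 1), (-1, 1)]

def aFiveLoop (b : List (List Int)) (row col size : Int) : List (Int × Int) → Bool
  | [] => false
  | p :: ds =>
    if 5 ≤ check_line_fast b row col p.1 p.2 size 5 then true
    else aFiveLoop b row col size ds

def check_five_in_row_from_position (b : List (List Int)) (row col size : Int) : Bool :=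
  if pvCell b row col = 0 then false
  else aFiveLoop b row col size aDirs

def aThreatLoop (b : List (List Int)) (row col size : Int) (tl : Int) : List (Int × Int) → Int
  | [] => tl
  | p :: ds =>
    let count := check_line_fast b row col p.1 p.2 size 4
    if 4 ≤ count then 2
    else if count = 3 then aThreatLoop b row col size (max tl 1) ds
    else aThreatLoop b row col size tl ds

def is_critical_move (board : List (List Int)) (row : Int) (col : Int) (player : Int) (size : Int) : Int :=
  let b := pvPlace board row col player
  if check_five_in_row_from_position b row col size then 3
  else aThreatLoop b row col size 0 aDirs

-- ===== PORT B =====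
-- B builds the four-cell window on each side of the move per axis and counts prefix runs.
def bCellAt (b : List (List Int)) (size r c : Int) : Option Int :=
  if 0 ≤ r ∧ r < size ∧ 0 ≤ c ∧ c < size then some (pvCell b r c) else none

def bPrefix (player : Int) : List (Option Int) → Int
  | [] => 0
  | v :: rest => if v = some player then 1 + bPrefix player rest else 0

def bFwd (b : List (List Int)) (size row col dx dy : Int) : List (Option Int) :=
  (PySem.List.pyRange 1 5 1).map (fun k => bCellAt b size (row + k * dx) (col + k * dy))

def bBwd (b : List (List Int)) (size row col dx dy : Int) : List (Option Int) :=
  (PySem.List.pyRange 1 5 1).map (fun k => bCellAt b size (row - k * dx) (col - k * dy))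

def bDirs : List (Int × Int) := [(0, 1), (1, 0), (1, 1), (-1, 1)]

def bLoop (b : List (List Int)) (row col player size best : Int) : List (Int × Int) → Int
  | [] => best
  | p :: ds =>
    let run := 1 + bPrefix player (bFwd b size row col p.1 p.2)
                 + bPrefix player (bBwd b size row col p.1 p.2)
    if 5 ≤ run then 3
    else if 4 ≤ run then bLoop b row col player size 2 ds
    else if run = 3 ∧ best < 1 then bLoop b row col player size 1 ds
    else bLoop b row col player size best ds

def is_critical_move_alt (board : List (List Int)) (row : Int) (col : Int) (player : Int) (size : Int) : Int :=
  let b := pvPlace board row col player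
  if player ≠ 0 then bLoop b row col player size 0 bDirs else 0

-- ===== PRECONDITION & SPEC =====
-- A raises IndexError when the placed cell's indices are out of Python range; its neighbour
-- reads are confined to the size×size window, but whether they stay inside a smaller or
-- ragged board depends on the cell VALUES, so Pre_ requires the whole window to exist
-- (this excludes some boards A happens to walk safely; see the cite in the claim).
def Pre_is_critical_move (board : List (List Int)) (row : Int) (col : Int) (player : Int) (size : Int) : Prop :=
  PySem.Raise.InRange board.length row ∧
  PySem.Raise.InRange (PySem.List.pyGetD board row ([] : List Int)).length col ∧
  size.toNat ≤ board.length ∧ ∀ l ∈ board, size.toNat ≤ l.length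
instance (board : List (List Int)) (row : Int) (col : Int) (player : Int) (size : Int) : Decidable (Pre_is_critical_move board row col player size) := by unfold Pre_is_critical_move; infer_instance

def pvWitness_is_critical_move : List (List Int) × Int × Int × Int × Int :=
  ([[0, 1, 0], [0, 1, 0], [0, 0, 0]], 2, 1, 1, 3)

def Spec_is_critical_move (board : List (List Int)) (row : Int) (col : Int) (player : Int) (size : Int) (out : Int) : Prop := out = is_critical_move_alt board row col player size
instance (board : List (List Int)) (row : Int) (col : Int) (player : Int) (size : Int) (out : Int) : Decidable (Spec_is_critical_move board row col player size out) := by unfold Spec_is_critical_move; infer_instance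

-- ===== CLAIM (what is proved, stated in full; the proofs are below) =====
def Claim_equal_is_critical_move : Prop := ∀ (board : List (List Int)) (row : Int) (col : Int) (player : Int) (size : Int), Dom_is_critical_move board row col player size → Pre_is_critical_move board row col player size → Spec_is_critical_move board row col player size (is_critical_move board row col player size)

-- ===== LEMMAS AND PROOFS =====

theorem bPrefix_nonneg (player : Int) (cells : List (Option Int)) : 0 ≤ bPrefix player cells := by
  induction cells with
  | nil => simp [bPrefix]
  | cons v rest ih => rw [bPrefix]; split_ifs <;> omega

theorem cellAt_iff (b : List (List Int)) (size r c player : Int) :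
    bCellAt b size r c = some player ↔
      (0 ≤ r ∧ r < size ∧ 0 ≤ c ∧ c < size ∧ pvCell b r c = player) := by
  unfold bCellAt
  split_ifs with h
  · simp [h]
  · constructor
    · intro hcon; cases hcon
    · intro hcon; exact absurd ⟨hcon.1, hcon.2.1, hcon.2.2.1, hcon.2.2.2.1⟩ h


theorem bFwd_lit (b : List (List Int)) (size row col dx dy : Int) :
    bFwd b size row col dx dy =
      [bCellAt b size (row + dx) (col + dy), bCellAt b size (row + dx + dx) (col + dy + dy),
       bCellAt b size (row + dx + dx + dx) (col + dy + dy + dy),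
       bCellAt b size (row + dx + dx + dx + dx) (col + dy + dy + dy + dy)] := by
  unfold bFwd
  rw [show PySem.List.pyRange 1 5 1 = [1, 2, 3, 4] from rfl]
  simp only [List.map_cons, List.map_nil]
  rw [show (row : Int) + 1 * dx = row + dx from by ring,
      show (col : Int) + 1 * dy = col + dy from by ring,
      show (row : Int) + 2 * dx = row + dx + dx from by ring,
      show (col : Int) + 2 * dy = col + dy + dy from by ring,
      show (row : Int) + 3 * dx = row + dx + dx + dx from by ring,
      show (col : Int) + 3 * dy = col + dy + dy + dy from by ring,
      show (row : Int) + 4 * dx = row + dx + dx + dx + dx from by ring,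
      show (col : Int) + 4 * dy = col + dy + dy + dy + dy from by ring]

theorem bBwd_lit (b : List (List Int)) (size row col dx dy : Int) :
    bBwd b size row col dx dy =
      [bCellAt b size (row - dx) (col - dy), bCellAt b size (row - dx - dx) (col - dy - dy),
       bCellAt b size (row - dx - dx - dx) (col - dy - dy - dy),
       bCellAt b size (row - dx - dx - dx - dx) (col - dy - dy - dy - dy)] := by
  unfold bBwd
  rw [show PySem.List.pyRange 1 5 1 = [1, 2, 3, 4] from rfl]
  simp only [List.map_cons, List.map_nil]
  rw [show (row : Int) - 1 * dx = row - dx from by ring,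
      show (col : Int) - 1 * dy = col - dy from by ring,
      show (row : Int) - 2 * dx = row - dx - dx from by ring,
      show (col : Int) - 2 * dy = col - dy - dy from by ring,
      show (row : Int) - 3 * dx = row - dx - dx - dx from by ring,
      show (col : Int) - 3 * dy = col - dy - dy - dy from by ring,
      show (row : Int) - 4 * dx = row - dx - dx - dx - dx from by ring,
      show (col : Int) - 4 * dy = col - dy - dy - dy - dy from by ring]

theorem aWhilePos_stop (b : List (List Int)) (size player dx dy target count r c : Int)
    (h : target ≤ count) : aWhilePos b size player dx dy target count r c = count := by
  rw [aWhilePos, dif_neg]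
  intro hc; omega

theorem aWhileNeg_stop (b : List (List Int)) (size player dx dy target count r c : Int)
    (h : target ≤ count) : aWhileNeg b size player dx dy target count r c = count := by
  rw [aWhileNeg, dif_neg]
  intro hc; omega

theorem aPosBlock_eq (b : List (List Int)) (size player dx dy target row col : Int)
    (ht : target ≤ 5) :
    aPosBlock b size player dx dy target row col =
      1 + bPrefix player (bFwd b size row col dx dy) := by
  rw [bFwd_lit]
  unfold aPosBlock
  by_cases g1 : 0 ≤ row + dx ∧ row + dx < size ∧ 0 ≤ col + dy ∧ col + dy < size ∧
      pvCell b (row + dx) (col + dy) = player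
  · rw [if_pos g1, bPrefix, if_pos ((cellAt_iff b size _ _ player).mpr g1)]
    by_cases g2 : 0 ≤ row + dx + dx ∧ row + dx + dx < size ∧ 0 ≤ col + dy + dy ∧
        col + dy + dy < size ∧ pvCell b (row + dx + dx) (col + dy + dy) = player
    · rw [if_pos g2, bPrefix, if_pos ((cellAt_iff b size _ _ player).mpr g2)]
      by_cases g3 : 0 ≤ row + dx + dx + dx ∧ row + dx + dx + dx < size ∧
          0 ≤ col + dy + dy + dy ∧ col + dy + dy + dy < size ∧
          pvCell b (row + dx + dx + dx) (col + dy + dy + dy) = player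
      · rw [if_pos g3, bPrefix, if_pos ((cellAt_iff b size _ _ player).mpr g3)]
        by_cases g4 : 0 ≤ row + dx + dx + dx + dx ∧ row + dx + dx + dx + dx < size ∧
            0 ≤ col + dy + dy + dy + dy ∧ col + dy + dy + dy + dy < size ∧
            pvCell b (row + dx + dx + dx + dx) (col + dy + dy + dy + dy) = player
        · rw [if_pos g4, bPrefix, if_pos ((cellAt_iff b size _ _ player).mpr g4),
            aWhilePos_stop _ _ _ _ _ _ _ _ _ ht, bPrefix]
          omega
        · rw [if_neg g4, bPrefix,
            if_neg (fun hc => g4 ((cellAt_iff b size _ _ player).mp hc))]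
          omega
      · rw [if_neg g3, bPrefix,
          if_neg (fun hc => g3 ((cellAt_iff b size _ _ player).mp hc))]
        omega
    · rw [if_neg g2, bPrefix,
        if_neg (fun hc => g2 ((cellAt_iff b size _ _ player).mp hc))]
      omega
  · rw [if_neg g1, bPrefix,
      if_neg (fun hc => g1 ((cellAt_iff b size _ _ player).mp hc))]
    omega

theorem aNegBlock_eq (b : List (List Int)) (size player dx dy target count row col : Int)
    (ht : target ≤ count + 4) :
    aNegBlock b size player dx dy target count row col =
      count + bPrefix player (bBwd b size row col dx dy) := by
  rw [bBwd_lit]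
  unfold aNegBlock
  by_cases g1 : 0 ≤ row - dx ∧ row - dx < size ∧ 0 ≤ col - dy ∧ col - dy < size ∧
      pvCell b (row - dx) (col - dy) = player
  · rw [if_pos g1, bPrefix, if_pos ((cellAt_iff b size _ _ player).mpr g1)]
    by_cases g2 : 0 ≤ row - dx - dx ∧ row - dx - dx < size ∧ 0 ≤ col - dy - dy ∧
        col - dy - dy < size ∧ pvCell b (row - dx - dx) (col - dy - dy) = player
    · rw [if_pos g2, bPrefix, if_pos ((cellAt_iff b size _ _ player).mpr g2)]
      by_cases g3 : 0 ≤ row - dx - dx - dx ∧ row - dx - dx - dx < size ∧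
          0 ≤ col - dy - dy - dy ∧ col - dy - dy - dy < size ∧
          pvCell b (row - dx - dx - dx) (col - dy - dy - dy) = player
      · rw [if_pos g3, bPrefix, if_pos ((cellAt_iff b size _ _ player).mpr g3)]
        by_cases g4 : 0 ≤ row - dx - dx - dx - dx ∧ row - dx - dx - dx - dx < size ∧
            0 ≤ col - dy - dy - dy - dy ∧ col - dy - dy - dy - dy < size ∧
            pvCell b (row - dx - dx - dx - dx) (col - dy - dy - dy - dy) = player
        · rw [if_pos g4, bPrefix, if_pos ((cellAt_iff b size _ _ player).mpr g4),
            aWhileNeg_stop _ _ _ _ _ _ _ _ _ ht, bPrefix]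
          omega
        · rw [if_neg g4, bPrefix,
            if_neg (fun hc => g4 ((cellAt_iff b size _ _ player).mp hc))]
          omega
      · rw [if_neg g3, bPrefix,
          if_neg (fun hc => g3 ((cellAt_iff b size _ _ player).mp hc))]
        omega
    · rw [if_neg g2, bPrefix,
        if_neg (fun hc => g2 ((cellAt_iff b size _ _ player).mp hc))]
      omega
  · rw [if_neg g1, bPrefix,
      if_neg (fun hc => g1 ((cellAt_iff b size _ _ player).mp hc))]
    omega

def pvRun (b : List (List Int)) (row col player size : Int) (p : Int × Int) : Int :=
  1 + bPrefix player (bFwd b size row col p.1 p.2) + bPrefix player (bBwd b size row col p.1 p.2)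

theorem clf_run (b : List (List Int)) (row col size target player : Int) (p : Int × Int)
    (hc : pvCell b row col = player) (hp : player ≠ 0) (ht : target ≤ 5) :
    check_line_fast b row col p.1 p.2 size target = pvRun b row col player size p := by
  unfold check_line_fast pvRun
  rw [hc, if_neg hp]
  have hf := bPrefix_nonneg player (bFwd b size row col p.1 p.2)
  rw [aPosBlock_eq b size player p.1 p.2 target row col ht,
    aNegBlock_eq b size player p.1 p.2 target _ row col (by omega)]

theorem place_center {α : Type} {xs : List α} {i : Int} {v d : α} (h : PySem.Raise.InRange xs.length i) :
    PySem.List.pyGetD (PySem.List.pySetD xs i v) i d = v := by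
  obtain ⟨h1, h2⟩ := h
  simp only [PySem.List.pySetD, PySem.List.pySet?, PySem.List.pyGetD, PySem.List.pyGet?,
    PySem.List.pyIdx?] at *
  by_cases hneg : 0 ≤ i
  · have hk : i.toNat < xs.length := by omega
    simp [hneg, h2, Option.getD, hk]
  · have hle : -(xs.length : Int) ≤ i := h1
    have hk : xs.length - (-i).toNat < xs.length := by omega
    simp only [hneg, if_false, hle, if_true, Option.map_some, Option.getD_some,
      List.length_set]
    simp [hk]

theorem center_eq (board : List (List Int)) (row col player : Int)
    (h1 : PySem.Raise.InRange board.length row)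
    (h2 : PySem.Raise.InRange (PySem.List.pyGetD board row ([] : List Int)).length col) :
    pvCell (pvPlace board row col player) row col = player := by
  unfold pvCell pvPlace
  rw [place_center h1, place_center h2]

theorem aFiveLoop_iff (b : List (List Int)) (row col size : Int) (ds : List (Int × Int)) :
    aFiveLoop b row col size ds = true ↔ ∃ p ∈ ds, 5 ≤ check_line_fast b row col p.1 p.2 size 5 := by
  induction ds with
  | nil => simp [aFiveLoop]
  | cons p ds ih =>
    rw [show aFiveLoop b row col size (p :: ds) =
      (if 5 ≤ check_line_fast b row col p.1 p.2 size 5 then true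
       else aFiveLoop b row col size ds) from rfl]
    split_ifs with h
    · simp [h]
    · simp [ih, h]

theorem bLoop_cons (b : List (List Int)) (row col player size best : Int)
    (p : Int × Int) (ds : List (Int × Int)) :
    bLoop b row col player size best (p :: ds) =
      if 5 ≤ pvRun b row col player size p then 3
      else if 4 ≤ pvRun b row col player size p then bLoop b row col player size 2 ds
      else if pvRun b row col player size p = 3 ∧ best < 1 then bLoop b row col player size 1 ds
      else bLoop b row col player size best ds := rfl

theorem bLoop_three (b : List (List Int)) (row col player size : Int)
    (ds : List (Int × Int)) (h : ∃ p ∈ ds, 5 ≤ pvRun b row col player size p) :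
    ∀ best, bLoop b row col player size best ds = 3 := by
  induction ds with
  | nil => simp at h
  | cons p ds ih =>
    intro best
    rw [bLoop_cons]
    rcases h with ⟨p', hp', h5⟩
    rcases List.mem_cons.1 hp' with rfl | hmem
    · rw [if_pos h5]
    · have h3 := ih ⟨p', hmem, h5⟩
      split_ifs <;> simp [h3]

theorem bLoop_two (b : List (List Int)) (row col player size : Int)
    (ds : List (Int × Int)) (h : ∀ p ∈ ds, pvRun b row col player size p < 5) :
    bLoop b row col player size 2 ds = 2 := by
  induction ds with
  | nil => rfl
  | cons p ds ih =>
    rw [bLoop_cons]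
    have h5 : ¬ 5 ≤ pvRun b row col player size p := by
      have := h p (List.mem_cons_self) ; omega
    have ih' := ih (fun p' hp' => h p' (List.mem_cons_of_mem _ hp'))
    rw [if_neg h5]
    split_ifs <;> simp_all

theorem threat_eq (b : List (List Int)) (row col player size : Int)
    (ds : List (Int × Int))
    (h5 : ∀ p ∈ ds, pvRun b row col player size p < 5)
    (hrel : ∀ p ∈ ds,
      check_line_fast b row col p.1 p.2 size 4 = pvRun b row col player size p) :
    ∀ tl, tl = 0 ∨ tl = 1 →
      aThreatLoop b row col size tl ds = bLoop b row col player size tl ds := by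
  induction ds with
  | nil => intro tl _; rfl
  | cons p ds ih =>
    intro tl htl
    have hre := hrel p (List.mem_cons_self)
    have h5p := h5 p (List.mem_cons_self)
    have ih' := ih (fun p' hp' => h5 p' (List.mem_cons_of_mem _ hp'))
      (fun p' hp' => hrel p' (List.mem_cons_of_mem _ hp'))
    rw [bLoop_cons]
    rw [show aThreatLoop b row col size tl (p :: ds) =
      (if 4 ≤ check_line_fast b row col p.1 p.2 size 4 then 2
       else if check_line_fast b row col p.1 p.2 size 4 = 3 then
         aThreatLoop b row col size (max tl 1) ds
       else aThreatLoop b row col size tl ds) from rfl]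
    rw [if_neg (by omega : ¬ 5 ≤ pvRun b row col player size p)]
    by_cases h4 : 4 ≤ check_line_fast b row col p.1 p.2 size 4
    · rw [if_pos h4, if_pos (by omega : 4 ≤ pvRun b row col player size p)]
      exact (bLoop_two b row col player size ds
        (fun p' hp' => h5 p' (List.mem_cons_of_mem _ hp'))).symm
    · rw [if_neg h4, if_neg (by omega : ¬ 4 ≤ pvRun b row col player size p)]
      by_cases h3 : check_line_fast b row col p.1 p.2 size 4 = 3
      · rw [if_pos h3]
        have hr3 : pvRun b row col player size p = 3 := by omega
        rcases htl with rfl | rfl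
        · rw [if_pos ⟨hr3, by omega⟩]
          simpa using ih' 1 (Or.inr rfl)
        · rw [if_neg (by simp [hr3])]
          simpa using ih' 1 (Or.inr rfl)
      · rw [if_neg h3, if_neg (by omega)]
        exact ih' tl htl

theorem main_eq (board : List (List Int)) (row col player size : Int)
    (hpre : Pre_is_critical_move board row col player size) :
    is_critical_move board row col player size = is_critical_move_alt board row col player size := by
  obtain ⟨h1, h2, -, -⟩ := hpre
  have hc := center_eq board row col player h1 h2
  simp only [is_critical_move, is_critical_move_alt]
  set b := pvPlace board row col player with hb
  by_cases hp : player = 0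
  · subst hp
    have hfive : check_five_in_row_from_position b row col size = false := by
      unfold check_five_in_row_from_position; rw [hc]; simp
    have hz : ∀ dx dy : Int, check_line_fast b row col dx dy size 4 = 0 := by
      intro dx dy; unfold check_line_fast; rw [hc]; simp
    simp only [hfive, Bool.false_eq_true, if_false, ne_eq, not_true_eq_false]
    simp [aDirs, aThreatLoop, hz]
  · have hrel : ∀ (t : Int), t ≤ 5 → ∀ p : Int × Int,
        check_line_fast b row col p.1 p.2 size t = pvRun b row col player size p :=
      fun t ht p => clf_run b row col size t player p hc hp ht
    rw [if_pos hp]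
    rw [show bDirs = aDirs from rfl]
    by_cases hwin : ∃ p ∈ aDirs, 5 ≤ pvRun b row col player size p
    · rw [bLoop_three b row col player size aDirs hwin 0]
      rw [if_pos (by
        unfold check_five_in_row_from_position
        rw [hc, if_neg hp]
        rw [aFiveLoop_iff]
        rcases hwin with ⟨p, hmem, hr⟩
        exact ⟨p, hmem, by rw [hrel 5 (by norm_num) p]; exact hr⟩)]
    · replace hwin : ∀ p ∈ aDirs, pvRun b row col player size p < 5 := by
        intro p hmem
        by_contra hge
        exact hwin ⟨p, hmem, by omega⟩
      rw [if_neg (by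
        unfold check_five_in_row_from_position
        rw [hc, if_neg hp]
        rw [aFiveLoop_iff]
        simp only [not_exists]
        rintro p ⟨hmem, hp5⟩
        rw [hrel 5 (by norm_num) p] at hp5
        have := hwin p hmem
        omega)]
      exact threat_eq b row col player size aDirs hwin
        (fun p _ => hrel 4 (by norm_num) p) 0 (Or.inl rfl)

-- ===== VERDICT (by name: the statement is the Claim_ definition above) =====
theorem is_critical_move_spec : Claim_equal_is_critical_move := by
  intro board row col player size _ hpre
  unfold Spec_is_critical_move
  exact main_eq board row col player size hpre
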